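-- pv_equiv track=rewrite | github.com/poulsbopete/dashboard-alert-migration | mig-to-kbn/observability_migration/adapters/source/grafana/panels.py | _nested_mv_append_expr
-- ===== SOURCE A (Python) =====
-- def _nested_mv_append_expr(items):
--     values = [str(item) for item in items if str(item)]
--     if not values:
--         return '""'
--     expr = values[0]
--     for value in values[1:]:
--         expr = f"MV_APPEND({expr}, {value})"
--     return expr
-- ===== SOURCE B (Python) =====
-- def _nested_mv_append_expr(items):
--     values = [s for s in (str(item) for item in items) if s]
--     if not values:
--         return '""'
--     return ("MV_APPEND(" * (len(values) - 1)
--             + values[0]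
--             + "".join(f", {v})" for v in values[1:]))
-- ===== Notes on version B (the rewrite author's own statement) =====
-- stated objective: faster
-- what changed: Instead of repeatedly wrapping a growing accumulator string (copying it each iteration), B computes the count of 'MV_APPEND(' prefixes up front and joins the per-value ', v)' suffixes in one pass.
import Mathlib
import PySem

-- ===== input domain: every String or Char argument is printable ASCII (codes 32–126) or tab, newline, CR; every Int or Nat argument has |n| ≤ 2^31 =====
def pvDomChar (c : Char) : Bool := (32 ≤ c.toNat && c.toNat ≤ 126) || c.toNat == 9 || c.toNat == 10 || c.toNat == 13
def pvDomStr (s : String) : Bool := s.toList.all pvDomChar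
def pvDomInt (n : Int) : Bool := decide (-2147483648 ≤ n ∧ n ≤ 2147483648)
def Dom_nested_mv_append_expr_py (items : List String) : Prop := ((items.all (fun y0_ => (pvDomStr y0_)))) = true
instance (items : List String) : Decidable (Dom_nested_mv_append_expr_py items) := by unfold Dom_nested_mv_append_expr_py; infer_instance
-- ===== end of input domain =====

-- B builds the result as a counted 'MV_APPEND(' prefix plus one joined pass of ', v)' suffixes
-- instead of A's repeated wrapping of a growing accumulator; objective: alternative decomposition.

-- ===== PORT A =====
-- values = [str(item) for item in items if str(item)]; str on a str is identity, truthiness = non-empty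
def nested_mv_append_expr_py (items : List String) : String :=
  let values := items.filter (fun s => s ≠ "")
  match values with
  | [] => "\"\""
  | v0 :: rest => rest.foldl (fun expr value => "MV_APPEND(" ++ expr ++ ", " ++ value ++ ")") v0

-- ===== PORT B =====
-- "MV_APPEND(" * n  (Python string repetition)
def pvStrMul (s : String) : Nat → String
  | 0 => ""
  | n + 1 => s ++ pvStrMul s n

-- "".join(f", {v})" for v in tail)
def pvJoinParts : List String → String
  | [] => ""
  | v :: tl => (", " ++ v ++ ")") ++ pvJoinParts tl

def nested_mv_append_expr_py_alt (items : List String) : String :=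
  let values := items.filter (fun s => s ≠ "")
  match values with
  | [] => "\"\""
  | v0 :: rest => pvStrMul "MV_APPEND(" rest.length ++ v0 ++ pvJoinParts rest

-- ===== PRECONDITION & SPEC =====
def Spec_nested_mv_append_expr_py (items : List String) (out : String) : Prop := out = nested_mv_append_expr_py_alt items
instance (items : List String) (out : String) : Decidable (Spec_nested_mv_append_expr_py items out) := by unfold Spec_nested_mv_append_expr_py; infer_instance

-- ===== CLAIM (what is proved, stated in full; the proofs are below) =====
def Claim_equal_nested_mv_append_expr_py : Prop := ∀ (items : List String), Dom_nested_mv_append_expr_py items → Spec_nested_mv_append_expr_py items (nested_mv_append_expr_py items)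

-- ===== LEMMAS AND PROOFS =====
theorem pvStrMul_swap (s t : String) (n : Nat) :
    pvStrMul s n ++ (s ++ t) = s ++ (pvStrMul s n ++ t) := by
  induction n with
  | zero => simp [pvStrMul]
  | succ k ih => simp [pvStrMul, String.append_assoc, ih]

theorem foldl_wrap (rest : List String) (acc : String) :
    rest.foldl (fun expr value => "MV_APPEND(" ++ expr ++ ", " ++ value ++ ")") acc
      = pvStrMul "MV_APPEND(" rest.length ++ acc ++ pvJoinParts rest := by
  induction rest generalizing acc with
  | nil => simp [pvStrMul, pvJoinParts]
  | cons v tl ih =>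
    rw [List.foldl_cons, ih]
    simp [pvStrMul, pvJoinParts, String.append_assoc, pvStrMul_swap]

-- ===== VERDICT (by name: the statement is the Claim_ definition above) =====
theorem nested_mv_append_expr_py_spec : Claim_equal_nested_mv_append_expr_py := by
  intro items _
  unfold Spec_nested_mv_append_expr_py nested_mv_append_expr_py nested_mv_append_expr_py_alt
  cases h : items.filter (fun s => s ≠ "") with
  | nil => simp
  | cons v0 rest => simp [foldl_wrap]
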